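-- pv_equiv track=rewrite | github.com/Tech-savvyPavithra/HCL_Training_Stream_3_Python | Day2/cum.py | cuml
-- ===== SOURCE A (Python) =====
-- def cuml(lst):
--     res=[]
--     for num in lst:
--         if num<0:
--             break
--         elif not res:
--             res.append(num)
--         else:
--             res.append(num+res[-1])
--     return res
--
-- lst=[]
-- ===== SOURCE B (Python) =====
-- def cuml(lst):
--     k = next((i for i, x in enumerate(lst) if x < 0), len(lst))
--     return [sum(lst[:i + 1]) for i in range(k)]
-- ===== Notes on version B (the rewrite author's own statement) =====
-- stated objective: alternative
-- what changed: B first finds the index k of the first negative element, then computes each output element independently as the closed-form prefix sum sum(lst[:i+1]), replacing A's single stateful pass (break + incremental res[-1] append) with index-search plus per-position recomputation.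
import Mathlib
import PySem

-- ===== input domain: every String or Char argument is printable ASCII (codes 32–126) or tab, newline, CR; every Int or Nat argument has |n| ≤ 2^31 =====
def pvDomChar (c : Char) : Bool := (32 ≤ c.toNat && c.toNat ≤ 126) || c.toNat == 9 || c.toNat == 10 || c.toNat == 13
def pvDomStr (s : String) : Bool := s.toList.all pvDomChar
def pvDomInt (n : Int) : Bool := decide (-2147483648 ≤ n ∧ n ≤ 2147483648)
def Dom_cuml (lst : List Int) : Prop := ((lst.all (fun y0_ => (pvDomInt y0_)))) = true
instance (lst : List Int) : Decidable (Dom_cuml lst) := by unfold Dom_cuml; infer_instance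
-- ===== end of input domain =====

-- B replaces A's single stateful pass (break + incremental res[-1] append) with
-- index-search for the first negative, then an independent closed-form prefix sum per position.


-- ===== PORT A =====
-- loop over lst with accumulator res; 'break' = return res; res[-1] = getLastD (guarded nonempty)
def cumlLoop (res : List Int) : List Int → List Int
  | [] => res
  | num :: rest =>
    if num < 0 then res
    else if res = [] then cumlLoop (res ++ [num]) rest
    else cumlLoop (res ++ [num + res.getLastD 0]) rest

def cuml (lst : List Int) : List Int := cumlLoop [] lst

-- ===== PORT B =====
-- next((i for i,x in enumerate(lst) if x < 0), len(lst)): scan for first negative index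
def firstNegIdx : List Int → Nat
  | [] => 0
  | x :: xs => if x < 0 then 0 else firstNegIdx xs + 1

-- [sum(lst[:i+1]) for i in range(k)]; lst[:i+1] with i ≥ 0 is exactly List.take (i+1)
def cuml_alt (lst : List Int) : List Int :=
  (List.range (firstNegIdx lst)).map (fun i => (lst.take (i + 1)).sum)

-- ===== PRECONDITION & SPEC =====
def Spec_cuml (lst : List Int) (out : List Int) : Prop := out = cuml_alt lst
instance (lst : List Int) (out : List Int) : Decidable (Spec_cuml lst out) := by unfold Spec_cuml; infer_instance

-- ===== CLAIM (what is proved, stated in full; the proofs are below) =====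
def Claim_equal_cuml : Prop := ∀ (lst : List Int), Dom_cuml lst → Spec_cuml lst (cuml lst)

-- ===== LEMMAS AND PROOFS =====
-- A's loop in closed form: it appends the running sums of the elements still to scan,
-- carried on top of res's last element, stopping at the first negative.
def accumFrom (c : Int) : List Int → List Int
  | [] => []
  | x :: xs => if x < 0 then [] else (c + x) :: accumFrom (c + x) xs

theorem cumlLoop_invariant (lst res : List Int) :
    cumlLoop res lst = res ++ accumFrom (res.getLastD 0) lst := by
  induction lst generalizing res with
  | nil => simp [cumlLoop, accumFrom]
  | cons num rest ih =>
    by_cases hneg : num < 0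
    · simp [cumlLoop, hneg, accumFrom]
    · by_cases hres : res = ([] : List Int)
      · subst hres
        simp [cumlLoop, hneg, accumFrom, ih]
      · simp only [cumlLoop, if_neg hneg, if_neg hres, ih, accumFrom]
        simp [List.append_assoc, Int.add_comm]

theorem accumFrom_closed (lst : List Int) (c : Int) :
    accumFrom c lst =
      (List.range (firstNegIdx lst)).map (fun i => c + (lst.take (i + 1)).sum) := by
  induction lst generalizing c with
  | nil => simp [accumFrom, firstNegIdx]
  | cons x xs ih =>
    by_cases hx : x < 0
    · simp [accumFrom, firstNegIdx, hx]
    · simp only [accumFrom, firstNegIdx, if_neg hx, ih (c + x),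
        List.range_succ_eq_map, List.map_cons, List.map_map]
      congr 1
      · simp [Int.add_comm]
      · apply List.map_congr_left
        intro i _
        simp [List.take_succ_cons, Function.comp]
        ring

-- ===== VERDICT (by name: the statement is the Claim_ definition above) =====
theorem cuml_spec : Claim_equal_cuml := by
  intro lst _
  unfold Spec_cuml cuml cuml_alt
  rw [cumlLoop_invariant, accumFrom_closed]
  simp
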